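-- pv_equiv track=rewrite | github.com/StefanNazarov76/LeetCode | 3803_count_residue_prefixes.py | residuePrefixes
-- ===== SOURCE A (Python) =====
-- def residuePrefixes(s: str) -> int:
--     seen = set()
--     ans = 0
--
--     for i in range(len(s)):
--         seen.add(s[i])
--
--         if len(seen) == (i + 1) % 3:
--             ans += 1
--
--     return ans
-- ===== SOURCE B (Python) =====
-- def residuePrefixes(s: str) -> int:
--     # pass 1: novelty flags -- 1 iff s[i] does not occur earlier in s
--     first = [0 if c in s[:i] else 1 for i, c in enumerate(s)]
--     # pass 2: prefix sums give the distinct-character count of each prefix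
--     distinct = []
--     total = 0
--     for x in first:
--         total += x
--         distinct.append(total)
--     # pass 3: count the matching prefixes
--     return sum(1 for i, d in enumerate(distinct) if d == (i + 1) % 3)
-- ===== Notes on version B (the rewrite author's own statement) =====
-- stated objective: alternative
-- what changed: Replaces A's single interleaved loop with a running set by three set-free passes: a novelty table (is s[i] absent from s[:i]), its prefix sums as a distinct-count table, and a separate counting pass over that table.
import Mathlib
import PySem

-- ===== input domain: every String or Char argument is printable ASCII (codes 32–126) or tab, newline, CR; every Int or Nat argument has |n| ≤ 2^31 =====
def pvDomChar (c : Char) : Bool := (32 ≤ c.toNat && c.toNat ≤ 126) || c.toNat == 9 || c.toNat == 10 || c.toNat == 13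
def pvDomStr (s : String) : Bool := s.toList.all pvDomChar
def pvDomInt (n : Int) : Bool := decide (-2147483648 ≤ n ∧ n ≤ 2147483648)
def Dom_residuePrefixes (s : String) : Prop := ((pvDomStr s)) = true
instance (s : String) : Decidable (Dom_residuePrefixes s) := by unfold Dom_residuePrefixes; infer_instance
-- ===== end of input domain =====

-- B replaces A's single loop carrying a running set by three set-free passes (novelty table,
-- prefix sums, counting pass): an alternative decomposition, not claimed faster.

-- ===== PORT A =====
def residuePrefixes (s : String) : Int :=
  let cs := s.toList
  ((PySem.List.pyRange 0 (cs.length : Int) 1).foldl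
    (fun (st : PySem.Set Char × Int) i =>
      let seen := st.1.add (PySem.List.pyGetD cs i ' ')
      (seen, if PySem.Set.len seen = PySem.Int.mod (i + 1) 3 then st.2 + 1 else st.2))
    (PySem.Set.empty, 0)).2

-- ===== PORT B =====
-- pass 1 of Source B: novelty flags — 1 iff cs[i] does not occur in cs[:i]
def pvNovelty (cs : List Char) : List Int :=
  (PySem.List.enumerate cs).map
    (fun p => if (PySem.List.slice cs none (some p.1)).contains p.2 then (0:Int) else 1)

-- pass 2 of Source B: prefix sums (distinct-count table), loop with (distinct, total) state
def pvPsum (xs : List Int) : List Int × Int :=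
  xs.foldl (fun st x => (st.1 ++ [st.2 + x], st.2 + x)) ([], 0)

-- pass 3 of Source B: the counting sum
def pvTally (ds : List Int) : Int :=
  ((PySem.List.enumerate ds).map
    (fun p => if p.2 = PySem.Int.mod (p.1 + 1) 3 then (1:Int) else 0)).sum

def residuePrefixes_alt (s : String) : Int :=
  pvTally (pvPsum (pvNovelty s.toList)).1

-- ===== PRECONDITION & SPEC =====
def Spec_residuePrefixes (s : String) (out : Int) : Prop := out = residuePrefixes_alt s
instance (s : String) (out : Int) : Decidable (Spec_residuePrefixes s out) := by unfold Spec_residuePrefixes; infer_instance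

-- ===== CLAIM (what is proved, stated in full; the proofs are below) =====
def Claim_equal_residuePrefixes : Prop := ∀ (s : String), Dom_residuePrefixes s → Spec_residuePrefixes s (residuePrefixes s)

-- ===== LEMMAS AND PROOFS =====

-- common closed form: number of prefixes whose distinct-char count equals (k+1) % 3
def pvCnt (cs : List Char) : Int :=
  ((List.range cs.length).map (fun k =>
    if PySem.Set.len (PySem.Set.ofList (cs.take (k+1))) = PySem.Int.mod ((k:Int)+1) 3
    then (1:Int) else 0)).sum

theorem pvLenOfList_append (l : List Char) (a : Char) :
    PySem.Set.len (PySem.Set.ofList (l ++ [a]))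
      = PySem.Set.len (PySem.Set.ofList l) + (if a ∈ l then 0 else 1) := by
  rw [PySem.Set.ofList_append_singleton]
  by_cases h : a ∈ l
  · rw [PySem.Set.add_of_mem ((PySem.Set.mem_ofList _ _).2 h)]
    simp [h]
  · rw [PySem.Set.add_of_not_mem (fun hm => h ((PySem.Set.mem_ofList _ _).1 hm))]
    simp [PySem.Set.len, h]

theorem pvCnt_append (l : List Char) (a : Char) :
    pvCnt (l ++ [a]) = pvCnt l
      + (if PySem.Set.len (PySem.Set.ofList (l ++ [a])) = PySem.Int.mod ((l.length:Int)+1) 3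
         then (1:Int) else 0) := by
  unfold pvCnt
  have hlen : (l ++ [a]).length = l.length + 1 := by simp
  rw [hlen, List.range_succ, List.map_append, List.sum_append]
  congr 2
  · apply List.map_congr_left
    intro k hk
    have hk' : k + 1 ≤ l.length := List.mem_range.1 hk
    rw [List.take_append_of_le_length hk']
  · simp [List.take_of_length_le]

theorem pvA_fold (cs : List Char) :
    (PySem.List.pyRange 0 (cs.length : Int) 1).foldl
      (fun (st : PySem.Set Char × Int) i =>
        let seen := st.1.add (PySem.List.pyGetD cs i ' ')
        (seen, if PySem.Set.len seen = PySem.Int.mod (i + 1) 3 then st.2 + 1 else st.2))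
      (PySem.Set.empty, 0)
    = (PySem.Set.ofList cs, pvCnt cs) := by
  induction cs using List.reverseRecOn with
  | nil => decide
  | append_singleton l a ih =>
    have hlen : (((l ++ [a]).length : Nat) : Int) = (l.length : Int) + 1 := by
      simp
    rw [hlen, PySem.List.pyRange_one_succ_right (by positivity), List.foldl_append]
    have hcong := PySem.List.foldl_congr_mem (PySem.List.pyRange 0 (l.length : Int) 1)
      (fun (st : PySem.Set Char × Int) i =>
        let seen := st.1.add (PySem.List.pyGetD (l ++ [a]) i ' ')
        (seen, if PySem.Set.len seen = PySem.Int.mod (i + 1) 3 then st.2 + 1 else st.2))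
      (fun (st : PySem.Set Char × Int) i =>
        let seen := st.1.add (PySem.List.pyGetD l i ' ')
        (seen, if PySem.Set.len seen = PySem.Int.mod (i + 1) 3 then st.2 + 1 else st.2))
      (PySem.Set.empty, 0)
      (by
        intro acc i hi
        have h := PySem.List.mem_pyRange_one.1 hi
        have h0 : (0:Int) ≤ i := h.1
        have h1 : i < (l.length : Int) := h.2
        have h1' : i.toNat < l.length := by omega
        simp only []
        rw [PySem.List.pyGetD_eq_getElem _ ' ' h0 (by simp; omega),
            PySem.List.pyGetD_eq_getElem _ ' ' h0 (by omega),
            List.getElem_append_left h1'])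
    rw [hcong, ih]
    simp only []
    have hget : PySem.List.pyGetD (l ++ [a]) (l.length : Int) ' ' = a := by
      rw [PySem.List.pyGetD_eq_getElem _ ' ' (by positivity) (by simp)]
      simp
    rw [List.foldl_cons, List.foldl_nil]
    show ((PySem.Set.ofList l).add (PySem.List.pyGetD (l ++ [a]) (l.length : Int) ' '),
          if PySem.Set.len ((PySem.Set.ofList l).add (PySem.List.pyGetD (l ++ [a]) (l.length : Int) ' '))
              = PySem.Int.mod ((l.length : Int) + 1) 3 then pvCnt l + 1 else pvCnt l)
        = (PySem.Set.ofList (l ++ [a]), pvCnt (l ++ [a]))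
    rw [hget, ← PySem.Set.ofList_append_singleton, pvCnt_append]
    split_ifs <;> simp

theorem pvNovelty_append (l : List Char) (a : Char) :
    pvNovelty (l ++ [a]) = pvNovelty l ++ [if a ∈ l then (0:Int) else 1] := by
  unfold pvNovelty
  rw [PySem.List.enumerate_append, List.map_append]
  congr 1
  · apply List.map_congr_left
    intro p hp
    obtain ⟨k, hk, rfl⟩ := (PySem.List.mem_enumerate_iff _ _ _).1 hp
    simp only [zero_add]
    rw [PySem.List.slice_to_natCast, PySem.List.slice_to_natCast,
        List.take_append_of_le_length (le_of_lt hk)]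
  · simp only [zero_add]
    rw [show PySem.List.enumerate [a] (l.length : Int) = [((l.length : Int), a)] from rfl]
    simp only [List.map_cons, List.map_nil]
    rw [PySem.List.slice_to_natCast, List.take_append_of_le_length (le_refl _),
        List.take_length]
    by_cases h : a ∈ l <;> simp [h]

theorem pvPsum_append (xs : List Int) (x : Int) :
    pvPsum (xs ++ [x]) = ((pvPsum xs).1 ++ [(pvPsum xs).2 + x], (pvPsum xs).2 + x) := by
  unfold pvPsum
  rw [List.foldl_append, List.foldl_cons, List.foldl_nil]

theorem pvTally_append (ds : List Int) (d : Int) :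
    pvTally (ds ++ [d]) = pvTally ds
      + (if d = PySem.Int.mod ((ds.length:Int)+1) 3 then (1:Int) else 0) := by
  unfold pvTally
  rw [PySem.List.enumerate_append, List.map_append, List.sum_append]
  congr 1
  simp only [zero_add]
  rw [show PySem.List.enumerate [d] (ds.length : Int) = [((ds.length : Int), d)] from rfl]
  simp

theorem pvB_main (cs : List Char) :
    (pvPsum (pvNovelty cs)).2 = PySem.Set.len (PySem.Set.ofList cs)
    ∧ (pvPsum (pvNovelty cs)).1.length = cs.length
    ∧ pvTally (pvPsum (pvNovelty cs)).1 = pvCnt cs := by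
  induction cs using List.reverseRecOn with
  | nil => refine ⟨rfl, rfl, rfl⟩
  | append_singleton l a ih =>
    obtain ⟨ih2, ihlen, ihtally⟩ := ih
    rw [pvNovelty_append, pvPsum_append]
    refine ⟨?_, ?_, ?_⟩
    · simp only []
      rw [ih2, pvLenOfList_append]
    · simp [ihlen]
    · simp only []
      rw [pvTally_append, ihtally, ihlen, ih2, ← pvLenOfList_append, pvCnt_append]

-- ===== VERDICT (by name: the statement is the Claim_ definition above) =====
theorem residuePrefixes_spec : Claim_equal_residuePrefixes := by
  intro s _
  unfold Spec_residuePrefixes residuePrefixes residuePrefixes_alt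
  simp only []
  rw [pvA_fold, (pvB_main s.toList).2.2]
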